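-- pv_equiv track=rewrite | github.com/manwar/perlweeklychallenge-club | challenge-305/roger-bell-west/python/ch-2.py | aliendictionary
-- ===== SOURCE A (Python) =====
-- def aliendictionary(a, dc):
--   mxl = max(len(x) for x in a)
--   dh = dict()
--   for i, c in enumerate(dc):
--     dh[c] = i + 1
--   b = a
--   numerics = dict()
--   for w in a:
--     n = 0
--     for i in range(mxl):
--       n *= 27
--       if i < len(w):
--         n += dh[w[i]]
--     numerics[w] = n
--   b.sort(key = lambda i: numerics[i])
--   return b
-- ===== SOURCE B (Python) =====
-- def aliendictionary(a, dc):
--   rank = {}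
--   for i, c in enumerate(dc):
--     rank[c] = i + 1
--   mxl = max((len(w) for w in a), default=0)
--   pairs = []
--   for w in a:
--     n = 0
--     for c in w:
--       n = n * 27 + rank[c]
--     pairs.append((w, n * 27 ** (mxl - len(w))))
--   m = max((n for (_, n) in pairs), default=0)
--   passes = 0
--   while m > 0:
--     m //= 27
--     passes += 1
--   for _ in range(passes):
--     buckets = [[] for _ in range(27)]
--     for (w, q) in pairs:
--       buckets[q % 27].append((w, q // 27))
--     nxt = []
--     for b in buckets:
--       nxt += b
--     pairs = nxt
--   a[:] = [w for (w, _) in pairs]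
--   return a
-- ===== Notes on version B (the rewrite author's own statement) =====
-- stated objective: alternative
-- what changed: B replaces A's comparison sort over precomputed big-integer keys by an LSD radix sort: the base-27 digits of each word's key are consumed least-significant first in stable bucket-distribution passes, so no comparisons between keys are ever made.
import Mathlib
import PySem

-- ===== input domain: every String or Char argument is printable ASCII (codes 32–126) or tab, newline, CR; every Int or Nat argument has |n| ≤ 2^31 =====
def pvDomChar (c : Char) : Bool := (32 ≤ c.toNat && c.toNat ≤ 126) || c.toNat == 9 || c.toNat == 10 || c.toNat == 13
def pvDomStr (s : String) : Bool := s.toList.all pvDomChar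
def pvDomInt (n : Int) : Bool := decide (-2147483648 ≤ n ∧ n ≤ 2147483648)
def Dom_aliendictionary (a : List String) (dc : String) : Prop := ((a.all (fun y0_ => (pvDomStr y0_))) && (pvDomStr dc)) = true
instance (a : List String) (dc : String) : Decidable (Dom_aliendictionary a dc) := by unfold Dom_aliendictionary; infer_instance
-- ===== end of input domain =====

-- B replaces the numeric-key comparison sort by an LSD radix (stable bucket) sort; equal return
-- values are proved (both A and B also mutate the argument list in place in Python, identically).

-- ===== PORT A =====
def aliendictionary (a : List String) (dc : String) : List String :=
  -- mxl = max(len(x) for x in a): `none` = Python's ValueError on empty `a`, excluded by Pre_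
  match PySem.List.max? (a.map (fun x => PySem.Str.len x)) (fun n => n) with
  | none => []
  | some mxl =>
    let dh : PySem.Dict Char Int :=
      (PySem.List.enumerate dc.toList).foldl (fun d ic => d.insert ic.2 (ic.1 + 1)) PySem.Dict.empty
    let numerics : PySem.Dict String Int :=
      a.foldl (fun nd w =>
        nd.insert w ((PySem.List.pyRange 0 mxl).foldl (fun n i =>
          let n' := n * 27
          -- dh[w[i]] with i < len(w): pyGet? is `some` there, and the KeyError case (a character
          -- of w missing from dh) is excluded by Pre_, so the getD defaults are never taken
          if i < PySem.Str.len w then n' + dh.getD ((PySem.Str.pyGet? w i).getD ' ') 0 else n') 0))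
        PySem.Dict.empty
    PySem.List.sorted a (fun w => numerics.getD w 0)

-- ===== PORT B =====
-- helper for B's `while m > 0: m //= 27; passes += 1` loop (number of base-27 digits);
-- the first argument is fuel that merely makes the recursion structural (m.toNat + 1 suffices)
def digitCount27Go : Nat → Int → Nat
  | 0, _ => 0
  | f + 1, m => if 0 < m then digitCount27Go f (PySem.Int.floordiv m 27) + 1 else 0
def digitCount27 (m : Int) : Nat := digitCount27Go (m.toNat + 1) m

def aliendictionary_alt (a : List String) (dc : String) : List String :=
  let rank : PySem.Dict Char Int :=
    (PySem.List.enumerate dc.toList).foldl (fun d ic => d.insert ic.2 (ic.1 + 1)) PySem.Dict.empty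
  let mxl := PySem.List.maxD (a.map (fun w => PySem.Str.len w)) (fun n => n) 0
  let pairs : List (String × Int) := a.foldl (fun ps w =>
      -- rank[c]: the KeyError case is excluded by Pre_, so the getD default is never taken
      ps ++ [(w, (w.toList.foldl (fun n c => n * 27 + rank.getD c 0) 0)
                   * 27 ^ (mxl - PySem.Str.len w).toNat)]) []
  let m0 := PySem.List.maxD (pairs.map (fun p => p.2)) (fun n => n) 0
  let final := (PySem.List.pyRange 0 (digitCount27 m0 : Int)).foldl (fun ps _p =>
      -- buckets[q % 27].append((w, q // 27)): q % 27 is nonnegative (positive divisor),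
      -- so .toNat is exact here
      (ps.foldl (fun bs p => bs.set (PySem.Int.mod p.2 27).toNat
          (bs[(PySem.Int.mod p.2 27).toNat]! ++ [(p.1, PySem.Int.floordiv p.2 27)]))
          (List.replicate 27 ([] : List (String × Int)))).foldl (fun nxt b => nxt ++ b) [])
      pairs
  final.map (fun p => p.1)

-- ===== PRECONDITION & SPEC =====
-- Pre_ excludes exactly the inputs where Python A raises: an empty list (ValueError from max)
-- and a word containing a character absent from dc (KeyError from dh[w[i]]).
def Pre_aliendictionary (a : List String) (dc : String) : Prop :=
  a ≠ [] ∧ (a.all (fun w => w.toList.all (fun c => dc.toList.contains c))) = true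
instance (a : List String) (dc : String) : Decidable (Pre_aliendictionary a dc) := by
  unfold Pre_aliendictionary; infer_instance
def pvWitness_aliendictionary : List String × String := (["a"], "a")

def Spec_aliendictionary (a : List String) (dc : String) (out : List String) : Prop :=
  out = aliendictionary_alt a dc
instance (a : List String) (dc : String) (out : List String) : Decidable (Spec_aliendictionary a dc out) := by
  unfold Spec_aliendictionary; infer_instance

-- ===== CLAIM (what is proved, stated in full; the proofs are below) =====
def Claim_equal_aliendictionary : Prop := ∀ (a : List String) (dc : String),
  Dom_aliendictionary a dc → Pre_aliendictionary a dc →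
  Spec_aliendictionary a dc (aliendictionary a dc)
-- ===== LEMMAS AND PROOFS =====

theorem pv_mod_mul_decomp (n M : Int) (hM : 0 < M) :
    PySem.Int.mod n (M * 27) =
      PySem.Int.mod (PySem.Int.floordiv n M) 27 * M + PySem.Int.mod n M := by
  rw [PySem.Int.mod_eq_emod_of_pos (by omega), PySem.Int.mod_eq_emod_of_pos (by omega),
      PySem.Int.mod_eq_emod_of_pos (by omega), PySem.Int.floordiv_eq_ediv_of_pos (by omega)]
  have h1 : n % (M * 27) = n - (M * 27) * (n / (M * 27)) := by rw [Int.emod_def]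
  have h2 : n / M / 27 = n / (M * 27) := Int.ediv_ediv_of_nonneg (by omega)
  have h3 : (n / M) % 27 = n / M - 27 * (n / M / 27) := by rw [Int.emod_def]
  have h4 : n % M = n - M * (n / M) := by rw [Int.emod_def]
  rw [h1, h3, h4, h2]; ring

theorem pv_floordiv_floordiv (n M : Int) (hM : 0 < M) :
    PySem.Int.floordiv (PySem.Int.floordiv n M) 27 = PySem.Int.floordiv n (M * 27) := by
  rw [PySem.Int.floordiv_eq_ediv_of_pos (by omega), PySem.Int.floordiv_eq_ediv_of_pos (by omega),
      PySem.Int.floordiv_eq_ediv_of_pos (by omega)]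
  exact Int.ediv_ediv_of_nonneg (by omega)

theorem pv_go_bound : ∀ (f : Nat) (m : Int), m.toNat < f → m < 27 ^ digitCount27Go f m := by
  intro f
  induction f with
  | zero => intro m h; omega
  | succ f ih =>
    intro m h
    simp only [digitCount27Go]
    by_cases hm : 0 < m
    · simp only [hm, if_true]
      have hd : PySem.Int.floordiv m 27 = m / 27 := PySem.Int.floordiv_eq_ediv_of_pos (by omega)
      have := ih (PySem.Int.floordiv m 27) (by rw [hd]; omega)
      rw [pow_succ]
      rw [hd] at this
      have h2 : 0 < (27:Int) ^ digitCount27Go f (PySem.Int.floordiv m 27) := by positivity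
      rw [hd]
      omega
    · simp only [hm, if_false]
      simp
      omega

theorem pv_lt_pow_digitCount (m : Int) : m < 27 ^ digitCount27 m :=
  pv_go_bound _ m (by omega)

theorem pv_foldl_iterate {α : Type} (F : α → α) (P : Nat) (x : α) :
    (PySem.List.pyRange 0 (P : Int)).foldl (fun s _ => F s) x = F^[P] x := by
  induction P with
  | zero => simp [pysem]
  | succ P ih =>
    have : ((P:Int) + 1) = ((P+1 : Nat) : Int) := by push_cast; ring
    rw [← this, PySem.List.pyRange_one_succ_right (by positivity), List.foldl_append]
    simp [ih, Function.iterate_succ_apply']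


theorem pv_ins_congr {α : Type} (bf1 bf2 : α → α → Bool) (x : α) (ys : List α)
    (h : ∀ y ∈ ys, bf1 x y = bf2 x y) :
    PySem.List.insertBy bf1 x ys = PySem.List.insertBy bf2 x ys := by
  induction ys with
  | nil => simp [PySem.List.insertBy]
  | cons y t ih =>
    simp only [PySem.List.insertBy]
    rw [h y (by simp)]
    by_cases hb : bf2 x y
    · simp [hb]
    · simp only [hb]
      rw [ih (fun z hz => h z (by simp [hz]))]

theorem pv_sorted_key_congr_aux {α : Type} (xs acc : List α) (k1 k2 : α → Int)
    (h : ∀ x ∈ xs, k1 x = k2 x) (hacc : ∀ y ∈ acc, k1 y = k2 y) :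
    xs.foldl (fun acc x => PySem.List.insertBy (fun a b => decide (k1 a < k1 b)) x acc) acc
    = xs.foldl (fun acc x => PySem.List.insertBy (fun a b => decide (k2 a < k2 b)) x acc) acc := by
  induction xs generalizing acc with
  | nil => rfl
  | cons x t ih =>
    simp only [List.foldl_cons]
    have hx : k1 x = k2 x := h x (by simp)
    have hstep : PySem.List.insertBy (fun a b => decide (k1 a < k1 b)) x acc
        = PySem.List.insertBy (fun a b => decide (k2 a < k2 b)) x acc := by
      apply pv_ins_congr
      intro y hy
      rw [hx, hacc y hy]
    rw [hstep]
    apply ih _ (fun z hz => h z (by simp [hz]))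
    intro y hy
    rcases (PySem.List.mem_insertBy _ _ _ _).mp hy with h' | h'
    · rw [h']; exact hx
    · exact hacc y h'

theorem pv_sorted_key_congr {α : Type} (xs : List α) (k1 k2 : α → Int)
    (h : ∀ x ∈ xs, k1 x = k2 x) :
    PySem.List.sorted xs k1 = PySem.List.sorted xs k2 := by
  rw [PySem.List.sorted_eq_foldl_insertBy, PySem.List.sorted_eq_foldl_insertBy]
  exact pv_sorted_key_congr_aux xs [] k1 k2 h (by simp)

theorem pv_ins_map {α β : Type} (f : α → β) (k : β → Int) (x : α) (ys : List α) :
    PySem.List.insertBy (fun a b => decide (k a < k b)) (f x) (ys.map f)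
    = (PySem.List.insertBy (fun a b => decide (k (f a) < k (f b))) x ys).map f := by
  induction ys with
  | nil => simp [PySem.List.insertBy]
  | cons y t ih =>
    simp only [List.map_cons, PySem.List.insertBy]
    by_cases hb : k (f x) < k (f y)
    · simp [hb]
    · simp [hb, ih]

theorem pv_sorted_map {α β : Type} (f : α → β) (k : β → Int) (xs : List α) :
    PySem.List.sorted (xs.map f) k = (PySem.List.sorted xs (fun x => k (f x))).map f := by
  rw [PySem.List.sorted_eq_foldl_insertBy, PySem.List.sorted_eq_foldl_insertBy]
  have : ∀ (l : List α) (acc : List α),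
      (l.map f).foldl (fun acc x => PySem.List.insertBy (fun a b => decide (k a < k b)) x acc) (acc.map f)
      = (l.foldl (fun acc x => PySem.List.insertBy (fun a b => decide (k (f a) < k (f b))) x acc) acc).map f := by
    intro l
    induction l with
    | nil => intro acc; rfl
    | cons x t ih =>
      intro acc
      simp only [List.map_cons, List.foldl_cons]
      rw [pv_ins_map, ih]
  exact this xs []

theorem pv_ins_eq {α : Type} (bf : α → α → Bool) (z : α) (m1 m2 : List α)
    (h1 : ∀ y ∈ m1, bf z y = false) (h2 : ∀ y ∈ m2, bf z y = true) :
    PySem.List.insertBy bf z (m1 ++ m2) = m1 ++ z :: m2 := by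
  induction m1 with
  | nil =>
    cases m2 with
    | nil => simp [PySem.List.insertBy]
    | cons y t => simp [PySem.List.insertBy, h2 y (by simp)]
  | cons y t ih =>
    simp only [List.cons_append, PySem.List.insertBy, h1 y (by simp)]
    simp only [Bool.false_eq_true, if_false]
    rw [ih (fun w hw => h1 w (by simp [hw]))]

theorem pv_ins_split {α : Type} (k : α → Int) (z : α) (S : List α)
    (hp : S.Pairwise (fun a b => k a ≤ k b)) :
    ∃ l1 l2, S = l1 ++ l2 ∧
      PySem.List.insertBy (fun a b => decide (k a < k b)) z S = l1 ++ z :: l2 ∧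
      (∀ y ∈ l1, k y ≤ k z) ∧ (∀ y ∈ l2, k z < k y) := by
  induction S with
  | nil => exact ⟨[], [], by simp, by simp [PySem.List.insertBy], by simp, by simp⟩
  | cons y t ih =>
    rcases List.pairwise_cons.mp hp with ⟨hy, ht⟩
    by_cases hb : k z < k y
    · refine ⟨[], y :: t, by simp, ?_, by simp, ?_⟩
      · simp [PySem.List.insertBy, hb]
      · intro w hw
        rcases List.mem_cons.mp hw with h' | h'
        · rw [h']; exact hb
        · exact lt_of_lt_of_le hb (hy w h')
    · rcases ih ht with ⟨l1, l2, hS, hins, hl1, hl2⟩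
      refine ⟨y :: l1, l2, by simp [hS], ?_, ?_, hl2⟩
      · simp only [PySem.List.insertBy, decide_eq_true_eq]
        simp [hb, hins]
      · intro w hw
        rcases List.mem_cons.mp hw with h' | h'
        · rw [h']; omega
        · exact hl1 w h'

theorem pv_buckets_sorted {α : Type} (xs : List α) (κ d : α → Int) (M R : Int)
    (hκ : ∀ x ∈ xs, 0 ≤ κ x ∧ κ x < M) (hd : ∀ x ∈ xs, 0 ≤ d x ∧ d x < R) :
    (PySem.List.pyRange 0 R).flatMap
        (fun dv => (PySem.List.sorted xs κ).filter (fun x => d x == dv))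
      = PySem.List.sorted xs (fun x => d x * M + κ x) := by
  induction xs using List.reverseRecOn with
  | nil =>
    have e1 : PySem.List.sorted ([] : List α) κ = [] := (PySem.List.sorted_eq_nil_iff _ _ _).mpr rfl
    have e2 : PySem.List.sorted ([] : List α) (fun x => d x * M + κ x) = [] :=
      (PySem.List.sorted_eq_nil_iff _ _ _).mpr rfl
    simp [e1, e2]
  | append_singleton xs z ih =>
    have hκ' : ∀ x ∈ xs, 0 ≤ κ x ∧ κ x < M := fun x hx => hκ x (by simp [hx])
    have hd' : ∀ x ∈ xs, 0 ≤ d x ∧ d x < R := fun x hx => hd x (by simp [hx])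
    have hκz := hκ z (by simp)
    have hdz := hd z (by simp)
    have ih' := ih hκ' hd'
    set S := PySem.List.sorted xs κ with hSdef
    have hpS : S.Pairwise (fun a b => κ a ≤ κ b) := PySem.List.sorted_pairwise xs κ
    obtain ⟨l1, l2, hSeq, hins, hl1, hl2⟩ := pv_ins_split κ z S hpS
    have hmemS : ∀ y ∈ S, y ∈ xs := fun y hy => (PySem.List.mem_sorted _ _ _ _).mp hy
    have hsortA : PySem.List.sorted (xs ++ [z]) κ = l1 ++ z :: l2 := by
      rw [PySem.List.sorted_eq_foldl_insertBy, List.foldl_append]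
      simp only [List.foldl_cons, List.foldl_nil]
      rw [← PySem.List.sorted_eq_foldl_insertBy]
      exact hins
    have hsortK : PySem.List.sorted (xs ++ [z]) (fun x => d x * M + κ x)
        = PySem.List.insertBy (fun a b => decide (d a * M + κ a < d b * M + κ b)) z
            (PySem.List.sorted xs (fun x => d x * M + κ x)) := by
      rw [PySem.List.sorted_eq_foldl_insertBy, List.foldl_append]
      simp only [List.foldl_cons, List.foldl_nil]
      rw [← PySem.List.sorted_eq_foldl_insertBy]
    -- the three range segments
    have hrsplit : PySem.List.pyRange 0 R
        = PySem.List.pyRange 0 (d z) ++ (d z :: PySem.List.pyRange (d z + 1) R) := by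
      have h2 := PySem.List.pyRange_one_cons (show d z < R from hdz.2)
      rw [PySem.List.pyRange_one_append 0 (d z) R hdz.1 (le_of_lt hdz.2), h2]
    set A1 : List α := (PySem.List.pyRange 0 (d z)).flatMap
        (fun dv => S.filter (fun x => d x == dv)) with hA1
    set A3 : List α := (PySem.List.pyRange (d z + 1) R).flatMap
        (fun dv => S.filter (fun x => d x == dv)) with hA3
    have hKsplit : PySem.List.sorted xs (fun x => d x * M + κ x)
        = A1 ++ ((l1.filter (fun x => d x == d z) ++ l2.filter (fun x => d x == d z)) ++ A3) := by
      rw [← ih', hrsplit, List.flatMap_append, List.flatMap_cons]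
      rw [show S.filter (fun x => d x == d z)
            = l1.filter (fun x => d x == d z) ++ l2.filter (fun x => d x == d z) by
          rw [hSeq, List.filter_append]]
    -- comparator facts
    have hbf1 : ∀ y ∈ A1 ++ l1.filter (fun x => d x == d z),
        (decide (d z * M + κ z < d y * M + κ y)) = false := by
      intro y hy
      simp only [decide_eq_false_iff_not, not_lt]
      rcases List.mem_append.mp hy with hy | hy
      · rcases List.mem_flatMap.mp hy with ⟨dv, hdv, hyf⟩
        have hdvlt : 0 ≤ dv ∧ dv < d z := PySem.List.mem_pyRange_one.mp hdv
        have hyS := List.mem_filter.mp hyf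
        have hdy : d y = dv := by have := hyS.2; simpa using this
        have hyx := hmemS y hyS.1
        have h1 := hκ' y hyx
        have : d y * M ≤ (d z - 1) * M :=
          mul_le_mul_of_nonneg_right (by omega) (by omega)
        have hM : 0 ≤ M := by omega
        nlinarith [h1.1, h1.2, hκz.1]
      · have hyS := List.mem_filter.mp hy
        have hdy : d y = d z := by have := hyS.2; simpa using this
        have := hl1 y hyS.1
        rw [hdy]
        omega
    have hbf2 : ∀ y ∈ l2.filter (fun x => d x == d z) ++ A3,
        (decide (d z * M + κ z < d y * M + κ y)) = true := by
      intro y hy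
      simp only [decide_eq_true_eq]
      rcases List.mem_append.mp hy with hy | hy
      · have hyS := List.mem_filter.mp hy
        have hdy : d y = d z := by have := hyS.2; simpa using this
        have := hl2 y hyS.1
        rw [hdy]
        omega
      · rcases List.mem_flatMap.mp hy with ⟨dv, hdv, hyf⟩
        have hdvlt : d z + 1 ≤ dv ∧ dv < R := PySem.List.mem_pyRange_one.mp hdv
        have hyS := List.mem_filter.mp hyf
        have hdy : d y = dv := by have := hyS.2; simpa using this
        have hyx := hmemS y hyS.1
        have h1 := hκ' y hyx
        have : (d z + 1) * M ≤ d y * M :=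
          mul_le_mul_of_nonneg_right (by omega) (by omega)
        nlinarith [h1.1, hκz.2]
    -- RHS
    have hRHS : PySem.List.sorted (xs ++ [z]) (fun x => d x * M + κ x)
        = (A1 ++ l1.filter (fun x => d x == d z)) ++ z ::
          (l2.filter (fun x => d x == d z) ++ A3) := by
      rw [hsortK, hKsplit]
      have : A1 ++ ((l1.filter (fun x => d x == d z) ++ l2.filter (fun x => d x == d z)) ++ A3)
          = (A1 ++ l1.filter (fun x => d x == d z)) ++ (l2.filter (fun x => d x == d z) ++ A3) := by
        simp [List.append_assoc]
      rw [this]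
      exact pv_ins_eq _ z _ _ hbf1 hbf2
    -- LHS
    have hfz : ∀ dv : Int, dv ≠ d z →
        (l1 ++ z :: l2).filter (fun x => d x == dv)
          = S.filter (fun x => d x == dv) := by
      intro dv hne
      rw [hSeq, List.filter_append, List.filter_append, List.filter_cons]
      have : (d z == dv) = false := by simp; omega
      simp [this]
    rw [hsortA, hRHS, hrsplit, List.flatMap_append, List.flatMap_cons]
    have e1 : (PySem.List.pyRange 0 (d z)).flatMap
        (fun dv => (l1 ++ z :: l2).filter (fun x => d x == dv)) = A1 := by
      apply List.flatMap_congr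
      intro dv hdv
      have := PySem.List.mem_pyRange_one.mp hdv
      exact hfz dv (by omega)
    have e3 : (PySem.List.pyRange (d z + 1) R).flatMap
        (fun dv => (l1 ++ z :: l2).filter (fun x => d x == dv)) = A3 := by
      apply List.flatMap_congr
      intro dv hdv
      have := PySem.List.mem_pyRange_one.mp hdv
      exact hfz dv (by omega)
    have e2 : (l1 ++ z :: l2).filter (fun x => d x == d z)
        = l1.filter (fun x => d x == d z) ++ z :: l2.filter (fun x => d x == d z) := by
      rw [List.filter_append, List.filter_cons]
      simp
    rw [e1, e3, e2]
    simp [List.append_assoc]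

def pvPass (ps : List (String × Int)) : List (String × Int) :=
  (PySem.List.pyRange 0 27).flatMap
    (fun d => (ps.filter (fun p => PySem.Int.mod p.2 27 == d)).map
      (fun p => (p.1, PySem.Int.floordiv p.2 27)))

theorem pv_bucket_fold (δ : String × Int → String × Int) (j : String × Int → Nat)
    (hj : ∀ p, j p < 27) (ps : List (String × Int)) :
    ∀ bs : List (List (String × Int)), bs.length = 27 →
    ps.foldl (fun bs p => bs.set (j p) (bs[j p]! ++ [δ p])) bs
      = (List.range 27).map (fun i => bs[i]! ++ (ps.filter (fun p => j p == i)).map δ) := by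
  induction ps with
  | nil =>
    intro bs hlen
    simp only [List.foldl_nil, List.filter_nil, List.map_nil, List.append_nil]
    apply List.ext_getElem
    · simp [hlen]
    · intro i h1 h2
      simp only [List.getElem_map, List.getElem_range]
      rw [getElem!_pos bs i (by simp at h2; omega)]
  | cons p t ih =>
    intro bs hlen
    simp only [List.foldl_cons]
    rw [ih _ (by simp [hlen])]
    apply List.map_congr_left
    intro i hi
    have hi27 : i < 27 := List.mem_range.mp hi
    have hjp := hj p
    have hset : (bs.set (j p) (bs[j p]! ++ [δ p]))[i]!
        = if j p = i then bs[j p]! ++ [δ p] else bs[i]! := by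
      rw [getElem!_pos _ i (by simp [hlen]; omega), List.getElem_set]
      split_ifs with h
      · rfl
      · rw [getElem!_pos bs i (by omega)]
    rw [hset, List.filter_cons]
    by_cases h : j p = i
    · simp only [h, beq_self_eq_true, if_true, List.map_cons]
      simp [List.append_assoc]
    · rw [if_neg h]
      rw [if_neg (by simp [h])]

theorem pv_pass_eq (ps : List (String × Int)) :
    (ps.foldl (fun bs p => bs.set (PySem.Int.mod p.2 27).toNat
        (bs[(PySem.Int.mod p.2 27).toNat]! ++ [(p.1, PySem.Int.floordiv p.2 27)]))
        (List.replicate 27 ([] : List (String × Int)))).foldl (fun nxt b => nxt ++ b) []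
    = pvPass ps := by
  have hmod : ∀ p : String × Int,
      0 ≤ PySem.Int.mod p.2 27 ∧ PySem.Int.mod p.2 27 < 27 := by
    intro p
    rw [PySem.Int.mod_eq_emod_of_pos (by omega)]
    exact ⟨Int.emod_nonneg _ (by omega), Int.emod_lt_of_pos _ (by omega)⟩
  have hj : ∀ p : String × Int, (PySem.Int.mod p.2 27).toNat < 27 := by
    intro p; have := hmod p; omega
  rw [pv_bucket_fold (fun p => (p.1, PySem.Int.floordiv p.2 27))
      (fun p => (PySem.Int.mod p.2 27).toNat) hj ps _ (by simp)]
  rw [PySem.List.foldl_append_eq_flatten, List.nil_append]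
  have hrep : (List.range 27).map (fun i =>
      (List.replicate 27 ([] : List (String × Int)))[i]! ++
        (ps.filter (fun p => (PySem.Int.mod p.2 27).toNat == i)).map
          (fun p => (p.1, PySem.Int.floordiv p.2 27)))
      = (List.range 27).map (fun i =>
        (ps.filter (fun p => (PySem.Int.mod p.2 27).toNat == i)).map
          (fun p => (p.1, PySem.Int.floordiv p.2 27))) := by
    apply List.map_congr_left
    intro i hi
    have hi27 : i < 27 := List.mem_range.mp hi
    rw [getElem!_pos _ i (by simp [hi27]), List.getElem_replicate, List.nil_append]
  rw [hrep, ← List.flatMap_def]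
  unfold pvPass
  rw [show (27:Int) = ((27:Nat):Int) by norm_num, PySem.List.pyRange_zero_natCast,
      List.flatMap_map]
  simp only [Nat.cast_ofNat]
  apply List.flatMap_congr
  intro k _
  congr 1
  apply List.filter_congr
  intro p _
  rw [Bool.eq_iff_iff]
  simp only [beq_iff_eq]
  have := hmod p
  omega

theorem pv_radix_inv (ps0 : List (String × Int)) (p : Nat) :
    pvPass^[p] ps0 =
      (PySem.List.sorted ps0 (fun x => PySem.Int.mod x.2 (27 ^ p))).map
        (fun x => (x.1, PySem.Int.floordiv x.2 (27 ^ p))) := by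
  induction p with
  | zero =>
    simp only [Function.iterate_zero, id_eq, pow_zero]
    have e1 : PySem.List.sorted ps0 (fun x => PySem.Int.mod x.2 1) = ps0 := by
      apply PySem.List.sorted_eq_self_of_pairwise
      apply List.pairwise_of_forall
      intro a b
      rw [PySem.Int.mod_eq_emod_of_pos (by omega), PySem.Int.mod_eq_emod_of_pos (by omega)]
      simp [Int.emod_one]
    rw [e1]
    have : (fun (x : String × Int) => (x.1, PySem.Int.floordiv x.2 1)) = fun x => x := by
      funext x
      rw [PySem.Int.floordiv_eq_ediv_of_pos (by omega)]
      simp [Int.ediv_one]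
    rw [this, List.map_id']
  | succ p ih =>
    rw [Function.iterate_succ_apply', ih]
    set M : Int := 27 ^ p with hM
    have hMpos : 0 < M := by positivity
    -- pvPass of the mapped sorted state
    unfold pvPass
    set L := PySem.List.sorted ps0 (fun x => PySem.Int.mod x.2 M) with hL
    have hLmem : ∀ y ∈ L, y ∈ ps0 := fun y hy => (PySem.List.mem_sorted _ _ _ _).mp hy
    have step1 : ∀ dv : Int,
        ((L.map (fun x => (x.1, PySem.Int.floordiv x.2 M))).filter
            (fun q => PySem.Int.mod q.2 27 == dv)).map
          (fun q => (q.1, PySem.Int.floordiv q.2 27))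
        = (L.filter (fun x => PySem.Int.mod (PySem.Int.floordiv x.2 M) 27 == dv)).map
            (fun x => (x.1, PySem.Int.floordiv x.2 (M * 27))) := by
      intro dv
      rw [List.filter_map, List.map_map]
      congr 1
      · funext x
        simp only [Function.comp]
        rw [pv_floordiv_floordiv _ _ hMpos]
    have step2 : (PySem.List.pyRange 0 27).flatMap
        (fun dv => ((L.map (fun x => (x.1, PySem.Int.floordiv x.2 M))).filter
            (fun q => PySem.Int.mod q.2 27 == dv)).map (fun q => (q.1, PySem.Int.floordiv q.2 27)))
        = ((PySem.List.pyRange 0 27).flatMap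
            (fun dv => L.filter (fun x => PySem.Int.mod (PySem.Int.floordiv x.2 M) 27 == dv))).map
          (fun x => (x.1, PySem.Int.floordiv x.2 (M * 27))) := by
      rw [List.map_flatMap]
      apply List.flatMap_congr
      intro dv _
      exact step1 dv
    rw [step2]
    have hbuck := pv_buckets_sorted ps0 (fun x => PySem.Int.mod x.2 M)
        (fun x => PySem.Int.mod (PySem.Int.floordiv x.2 M) 27) M 27
        (fun x _ => by
          constructor
          · show 0 ≤ PySem.Int.mod x.2 M
            rw [PySem.Int.mod_eq_emod_of_pos hMpos]; exact Int.emod_nonneg _ (by omega)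
          · show PySem.Int.mod x.2 M < M
            rw [PySem.Int.mod_eq_emod_of_pos hMpos]; exact Int.emod_lt_of_pos _ hMpos)
        (fun x _ => by
          constructor
          · show 0 ≤ PySem.Int.mod (PySem.Int.floordiv x.2 M) 27
            rw [PySem.Int.mod_eq_emod_of_pos (by omega)]; exact Int.emod_nonneg _ (by omega)
          · show PySem.Int.mod (PySem.Int.floordiv x.2 M) 27 < 27
            rw [PySem.Int.mod_eq_emod_of_pos (by omega)]; exact Int.emod_lt_of_pos _ (by omega))
    rw [← hL] at hbuck
    rw [hbuck]
    have hkey : (fun (x : String × Int) =>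
          PySem.Int.mod (PySem.Int.floordiv x.2 M) 27 * M + PySem.Int.mod x.2 M)
        = fun x => PySem.Int.mod x.2 (27 ^ (p + 1)) := by
      funext x
      rw [pow_succ, ← hM, ← pv_mod_mul_decomp _ _ hMpos]
    have hdiv : (fun (x : String × Int) => (x.1, PySem.Int.floordiv x.2 (M * 27)))
        = fun (x : String × Int) => (x.1, PySem.Int.floordiv x.2 (27 ^ (p + 1))) := by
      funext x
      rw [pow_succ, ← hM]
    rw [hkey, hdiv]

theorem pv_getD_foldl_insert_not_mem {κ ν : Type} [BEq κ] [LawfulBEq κ] [DecidableEq κ]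
    (l : List κ) (f : κ → ν) (d : PySem.Dict κ ν) (w : κ) (dflt : ν) (hw : w ∉ l) :
    (l.foldl (fun nd x => nd.insert x (f x)) d).getD w dflt = d.getD w dflt := by
  induction l generalizing d with
  | nil => rfl
  | cons x t ih =>
    simp only [List.foldl_cons]
    have hwt : w ∉ t := fun h => hw (by simp [h])
    rw [ih _ hwt, PySem.Dict.getD_insert]
    simp only [List.mem_cons, not_or] at hw
    simp [hw.1]

theorem pv_getD_foldl_insert {κ ν : Type} [BEq κ] [LawfulBEq κ] [DecidableEq κ]
    (l : List κ) (f : κ → ν) (d : PySem.Dict κ ν) (w : κ) (dflt : ν) (hw : w ∈ l) :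
    (l.foldl (fun nd x => nd.insert x (f x)) d).getD w dflt = f w := by
  induction l generalizing d with
  | nil => cases hw
  | cons x t ih =>
    simp only [List.foldl_cons]
    by_cases ht : w ∈ t
    · exact ih _ ht
    · have hx : w = x := by
        rcases List.mem_cons.mp hw with h | h
        · exact h
        · exact absurd h ht
      subst hx
      rw [pv_getD_foldl_insert_not_mem _ _ _ _ _ ht, PySem.Dict.getD_insert]
      simp

-- the rank dictionary has nonnegative values

theorem pv_getD_foldl_insert_nonneg (l : List (Int × Char)) (d : PySem.Dict Char Int)
    (hl : ∀ p ∈ l, 0 ≤ p.1 + 1) (hd : ∀ c, 0 ≤ d.getD c 0) (c : Char) :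
    0 ≤ (l.foldl (fun d ic => d.insert ic.2 (ic.1 + 1)) d).getD c 0 := by
  induction l generalizing d with
  | nil => exact hd c
  | cons p t ih =>
    simp only [List.foldl_cons]
    apply ih _ (fun q hq => hl q (by simp [hq]))
    intro c'
    rw [PySem.Dict.getD_insert]
    split_ifs
    · exact hl p (by simp)
    · exact hd c'

theorem pv_rank_nonneg (dc : String) (c : Char) :
    0 ≤ ((PySem.List.enumerate dc.toList).foldl
          (fun d ic => d.insert ic.2 (ic.1 + 1)) PySem.Dict.empty).getD c 0 := by
  apply pv_getD_foldl_insert_nonneg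
  · intro p hp
    rcases (PySem.List.mem_enumerate_iff _ _ _).mp hp with ⟨k, hk, rfl⟩
    simp
    omega
  · intro c'
    simp [PySem.Dict.getD, PySem.Dict.empty, PySem.Dict.get?]

theorem pv_horner_nonneg (rank : PySem.Dict Char Int) (hr : ∀ c, 0 ≤ rank.getD c 0)
    (cs : List Char) (n : Int) (hn : 0 ≤ n) :
    0 ≤ cs.foldl (fun n c => n * 27 + rank.getD c 0) n := by
  induction cs generalizing n with
  | nil => exact hn
  | cons c t ih =>
    simp only [List.foldl_cons]
    exact ih _ (by have := hr c; omega)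

-- A's positional key loop computes B's Horner-then-shift key

theorem pv_fold_tail (rank : PySem.Dict Char Int) (w : String) (l : List Int)
    (hl : ∀ i ∈ l, ¬ i < PySem.Str.len w) (n : Int) :
    l.foldl (fun n i =>
        let n' := n * 27
        if i < PySem.Str.len w then n' + rank.getD ((PySem.Str.pyGet? w i).getD ' ') 0 else n') n
      = n * 27 ^ l.length := by
  induction l generalizing n with
  | nil => simp
  | cons i t ih =>
    simp only [List.foldl_cons, List.length_cons]
    rw [if_neg (hl i (by simp))]
    rw [ih (fun j hj => hl j (by simp [hj]))]
    ring

theorem pv_fold_prefix (rank : PySem.Dict Char Int) (s : String) :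
    ∀ (v u : List Char), s.toList = u ++ v → ∀ n : Int,
    (PySem.List.pyRange (u.length : Int) ((u.length : Int) + v.length)).foldl (fun n i =>
        let n' := n * 27
        if i < PySem.Str.len s then n' + rank.getD ((PySem.Str.pyGet? s i).getD ' ') 0 else n') n
      = v.foldl (fun n c => n * 27 + rank.getD c 0) n := by
  intro v
  induction v with
  | nil =>
    intro u h n
    simp [pysem]
  | cons c v' ih =>
    intro u h n
    have hlen : PySem.Str.len s = (u.length : Int) + (v'.length + 1) := by
      rw [PySem.Str.len_eq, h]
      push_cast
      simp
    have hcons := PySem.List.pyRange_one_cons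
      (show (u.length : Int) < (u.length : Int) + (c :: v').length by simp)
    rw [hcons]
    simp only [List.foldl_cons]
    have hlt : (u.length : Int) < PySem.Str.len s := by rw [hlen]; push_cast; omega
    rw [if_pos hlt]
    have hget : PySem.Str.pyGet? s (u.length : Int) = some c := by
      rw [PySem.Str.pyGet?_natCast, h]
      simp [List.getElem?_append_right]
    rw [hget]
    simp only [Option.getD_some]
    have := ih (u ++ [c]) (by simp [h]) (n * 27 + rank.getD c 0)
    simp only [List.length_append, List.length_cons, List.length_nil] at this
    have harg : (u.length : Int) + 1 = ((u.length + 1 : Nat) : Int) := by push_cast; ring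
    have harg2 : (u.length : Int) + (c :: v').length = ((u.length + 1 : Nat) : Int) + v'.length := by
      push_cast; simp; ring
    rw [harg2]
    convert this using 3

theorem pv_akey_eq (rank : PySem.Dict Char Int) (mxl : Int) (w : String)
    (hw : PySem.Str.len w ≤ mxl) :
    (PySem.List.pyRange 0 mxl).foldl (fun n i =>
        let n' := n * 27
        if i < PySem.Str.len w then n' + rank.getD ((PySem.Str.pyGet? w i).getD ' ') 0 else n') 0
      = (w.toList.foldl (fun n c => n * 27 + rank.getD c 0) 0)
          * 27 ^ (mxl - PySem.Str.len w).toNat := by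
  have h0 : (0:Int) ≤ PySem.Str.len w := by rw [PySem.Str.len_eq]; positivity
  rw [PySem.List.pyRange_one_append 0 (PySem.Str.len w) mxl h0 hw, List.foldl_append]
  have h1 := pv_fold_prefix rank w w.toList [] rfl 0
  simp only [List.length_nil, Nat.cast_zero, zero_add] at h1
  rw [← PySem.Str.len_eq] at h1
  rw [h1]
  rw [show (mxl - PySem.Str.len w).toNat = (PySem.List.pyRange (PySem.Str.len w) mxl).length by
    rw [PySem.List.length_pyRange_one]]
  apply pv_fold_tail
  intro i hi
  have := PySem.List.mem_pyRange_one.mp hi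
  omega

theorem pv_main (a : List String) (dc : String) (hne : a ≠ []) :
    aliendictionary a dc = aliendictionary_alt a dc := by
  cases a with
  | nil => exact absurd rfl hne
  | cons w0 rest =>
  set R : PySem.Dict Char Int :=
    (PySem.List.enumerate dc.toList).foldl (fun d ic => d.insert ic.2 (ic.1 + 1))
      PySem.Dict.empty with hR
  have hRnn : ∀ c, 0 ≤ R.getD c 0 := fun c => pv_rank_nonneg dc c
  set M : Int := List.foldl max (PySem.Str.len w0) (rest.map (fun x => PySem.Str.len x)) with hM
  have hmax : PySem.List.max? ((w0 :: rest).map (fun x => PySem.Str.len x)) (fun n => n)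
      = some M := by
    rw [List.map_cons, PySem.List.max?_id_cons]
  set F : String → Int := fun w =>
    (w.toList.foldl (fun n c => n * 27 + R.getD c 0) 0) * 27 ^ (M - PySem.Str.len w).toNat
    with hF
  have hlenle : ∀ w ∈ w0 :: rest, PySem.Str.len w ≤ M := by
    intro w hw
    have := PySem.List.max?_isMax hmax (PySem.Str.len w)
      (List.mem_map_of_mem hw)
    simpa using this
  have hFnn : ∀ w, 0 ≤ F w := by
    intro w
    apply mul_nonneg (pv_horner_nonneg R hRnn _ 0 le_rfl) (by positivity)
  -- A side
  have hA : aliendictionary (w0 :: rest) dc = PySem.List.sorted (w0 :: rest) F := by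
    rw [aliendictionary]
    rw [hmax]
    apply pv_sorted_key_congr
    intro w hw
    rw [pv_getD_foldl_insert _ _ _ _ _ hw]
    exact pv_akey_eq R M w (hlenle w hw)
  -- B side
  have hB : aliendictionary_alt (w0 :: rest) dc = PySem.List.sorted (w0 :: rest) F := by
    rw [aliendictionary_alt]
    simp only [PySem.List.maxD, hmax, Option.getD_some]
    rw [PySem.List.foldl_append_singleton_eq_map]
    rw [List.nil_append]
    set pairs : List (String × Int) := (w0 :: rest).map (fun w => (w, F w)) with hpairs
    set m0 : Int := (PySem.List.max? (pairs.map (fun p => p.2)) (fun n => n)).getD 0 with hm0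
    set P : Nat := digitCount27 m0 with hP
    have hpassfn : (fun (ps : List (String × Int)) (_p : Int) =>
        (ps.foldl (fun bs p => bs.set (PySem.Int.mod p.2 27).toNat
            (bs[(PySem.Int.mod p.2 27).toNat]! ++ [(p.1, PySem.Int.floordiv p.2 27)]))
            (List.replicate 27 ([] : List (String × Int)))).foldl (fun nxt b => nxt ++ b) [])
        = fun ps _ => pvPass ps := by
      funext ps _p
      exact pv_pass_eq ps
    rw [hpassfn, pv_foldl_iterate pvPass P pairs, pv_radix_inv]
    rw [List.map_map]
    have hcomp : ((fun (p : String × Int) => p.1) ∘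
        (fun (x : String × Int) => (x.1, PySem.Int.floordiv x.2 (27 ^ P)))) =
        (fun (x : String × Int) => x.1) := rfl
    rw [hcomp]
    -- bound the keys by m0 < 27 ^ P
    have hmax0 : PySem.List.max? (pairs.map (fun p => p.2)) (fun n => n)
        = some (List.foldl max (F w0) ((rest.map (fun w => (w, F w))).map (fun p => p.2))) := by
      rw [hpairs, List.map_cons, List.map_cons, PySem.List.max?_id_cons]
    have hm0eq : m0 = List.foldl max (F w0) ((rest.map (fun w => (w, F w))).map (fun p => p.2)) := by
      rw [hm0, hmax0, Option.getD_some]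
    have hkle : ∀ x ∈ pairs, x.2 ≤ m0 := by
      intro x hx
      have := PySem.List.max?_isMax hmax0 x.2 (List.mem_map_of_mem hx)
      rw [hm0eq]
      simpa using this
    have hknn : ∀ x ∈ pairs, 0 ≤ x.2 := by
      intro x hx
      rcases List.mem_map.mp hx with ⟨w, _, rfl⟩
      exact hFnn w
    have hmodid : ∀ x ∈ pairs, PySem.Int.mod x.2 (27 ^ P) = x.2 := by
      intro x hx
      have h1 := hknn x hx
      have h2 : x.2 < 27 ^ P := lt_of_le_of_lt (hkle x hx) (pv_lt_pow_digitCount m0)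
      rw [PySem.Int.mod_eq_emod_of_pos (by positivity)]
      exact Int.emod_eq_of_lt h1 h2
    rw [pv_sorted_key_congr pairs _ (fun x => x.2) hmodid]
    rw [hpairs, pv_sorted_map (fun w => (w, F w)) (fun x => x.2) (w0 :: rest)]
    rw [List.map_map]
    have hcomp2 : ((fun (x : String × Int) => x.1) ∘ (fun w => (w, F w))) = id := rfl
    rw [hcomp2, List.map_id]
  rw [hA, hB]

-- ===== VERDICT (by name: the statement is the Claim_ definition above) =====
theorem aliendictionary_spec : Claim_equal_aliendictionary := by
  intro a dc _hdom hpre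
  exact pv_main a dc hpre.1
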